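-- pv_equiv track=rewrite | github.com/UKGANG/Leetcode | pointer/SecretArray.py | countAnalogousArrays
-- ===== SOURCE A (Python) =====
-- def countAnalogousArrays(consecutiveDifference, lowerBound, upperBound):
--     # Write your code here
--     # Find the maximum difference in the sequence
--     upper_diff = 0
--     lower_diff = 0
--     curr_diff = 0
--     for diff in consecutiveDifference:
--         curr_diff += diff
--         upper_diff = max(upper_diff, curr_diff)
--         lower_diff = min(lower_diff, curr_diff)
--     range_diff = upper_diff - lower_diff
--
--     return max(0, upperBound - lowerBound - range_diff + 1)
-- ===== SOURCE B (Python) =====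
-- def countAnalogousArrays(consecutiveDifference, lowerBound, upperBound):
--     # Interval propagation: maintain the interval [lo, hi] of values the
--     # current array element can take, shifting it by each difference and
--     # clamping it back into [lowerBound, upperBound] at every step.
--     lo, hi = lowerBound, upperBound
--     for d in consecutiveDifference:
--         lo = max(lowerBound, lo + d)
--         hi = min(upperBound, hi + d)
--     return max(0, hi - lo + 1)
-- ===== Notes on version B (the rewrite author's own statement) =====
-- stated objective: alternative
-- what changed: Replaces the prefix-sum analysis (running max/min of cumulative differences, then a closed-form count) with forward interval propagation: B tracks the interval [lo,hi] of values the current element can take, shifting it by each difference and clamping it into [lowerBound,upperBound], and returns the final interval's size.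
import Mathlib
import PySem

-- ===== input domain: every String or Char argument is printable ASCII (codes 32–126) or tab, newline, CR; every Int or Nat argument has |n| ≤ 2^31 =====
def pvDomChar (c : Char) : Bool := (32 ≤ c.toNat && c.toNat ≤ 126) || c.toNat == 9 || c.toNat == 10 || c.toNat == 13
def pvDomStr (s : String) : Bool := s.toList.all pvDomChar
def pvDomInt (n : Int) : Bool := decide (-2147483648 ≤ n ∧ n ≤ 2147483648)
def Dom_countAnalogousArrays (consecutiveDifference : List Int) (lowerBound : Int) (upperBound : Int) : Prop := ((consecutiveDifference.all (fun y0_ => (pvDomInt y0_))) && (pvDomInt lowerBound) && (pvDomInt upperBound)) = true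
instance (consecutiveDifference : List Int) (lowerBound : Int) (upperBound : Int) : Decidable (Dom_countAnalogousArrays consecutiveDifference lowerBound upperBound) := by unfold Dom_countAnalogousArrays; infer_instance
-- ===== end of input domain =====

-- ===== PORT A =====
-- A: one pass keeping (curr_diff, upper_diff, lower_diff) over prefix sums, then a closed-form count.
def countAnalogousArrays (consecutiveDifference : List Int) (lowerBound : Int) (upperBound : Int) : Int :=
  let st := consecutiveDifference.foldl
    (fun (s : Int × Int × Int) diff =>
      let curr := s.1 + diff
      (curr, max s.2.1 curr, min s.2.2 curr))
    (0, 0, 0)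
  let range_diff := st.2.1 - st.2.2
  max 0 (upperBound - lowerBound - range_diff + 1)

-- ===== PORT B =====
-- B: interval propagation — shift the feasible interval [lo,hi] by each difference and clamp into bounds.
def countAnalogousArrays_alt (consecutiveDifference : List Int) (lowerBound : Int) (upperBound : Int) : Int :=
  let st := consecutiveDifference.foldl
    (fun (s : Int × Int) d =>
      (max lowerBound (s.1 + d), min upperBound (s.2 + d)))
    (lowerBound, upperBound)
  max 0 (st.2 - st.1 + 1)

-- ===== PRECONDITION & SPEC =====
def Spec_countAnalogousArrays (consecutiveDifference : List Int) (lowerBound : Int) (upperBound : Int) (out : Int) : Prop := out = countAnalogousArrays_alt consecutiveDifference lowerBound upperBound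
instance (consecutiveDifference : List Int) (lowerBound : Int) (upperBound : Int) (out : Int) : Decidable (Spec_countAnalogousArrays consecutiveDifference lowerBound upperBound out) := by unfold Spec_countAnalogousArrays; infer_instance

-- ===== CLAIM (what is proved, stated in full; the proofs are below) =====
def Claim_equal_countAnalogousArrays : Prop := ∀ (consecutiveDifference : List Int) (lowerBound : Int) (upperBound : Int), Dom_countAnalogousArrays consecutiveDifference lowerBound upperBound → Spec_countAnalogousArrays consecutiveDifference lowerBound upperBound (countAnalogousArrays consecutiveDifference lowerBound upperBound)

-- ===== LEMMAS AND PROOFS =====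
-- Invariant: B's interval after any steps is (lb + curr - low, ub + curr - up) in terms of A's state.
theorem pvFold_link (lb ub : Int) (ds : List Int) : ∀ (curr up low : Int),
    ds.foldl (fun (s : Int × Int) d => (max lb (s.1 + d), min ub (s.2 + d)))
      (lb + curr - low, ub + curr - up)
    = (let st := ds.foldl (fun (s : Int × Int × Int) diff =>
          let c := s.1 + diff
          (c, max s.2.1 c, min s.2.2 c)) (curr, up, low)
       (lb + st.1 - st.2.2, ub + st.1 - st.2.1)) := by
  induction ds with
  | nil => intro curr up low; simp
  | cons d t ih =>
      intro curr up low
      simp only [List.foldl]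
      have h1 : max lb (lb + curr - low + d) = lb + (curr + d) - min low (curr + d) := by omega
      have h2 : min ub (ub + curr - up + d) = ub + (curr + d) - max up (curr + d) := by omega
      rw [h1, h2]
      exact ih (curr + d) (max up (curr + d)) (min low (curr + d))

-- ===== VERDICT (by name: the statement is the Claim_ definition above) =====
theorem countAnalogousArrays_spec : Claim_equal_countAnalogousArrays := by
  intro ds lb ub _
  unfold Spec_countAnalogousArrays countAnalogousArrays countAnalogousArrays_alt
  have h := pvFold_link lb ub ds 0 0 0
  simp only [Int.add_zero, Int.sub_zero] at h
  rw [h]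
  simp only []
  omega
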